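-- pv_equiv track=rewrite | github.com/nhcha6/DigitalTwinCattle | DeepLearningModel/LSTM_encoder_decoder_FIR.py | invert_differening
-- ===== SOURCE A (Python) =====
-- def invert_differening(diff_seq, init):
--     first_inv = [init[1]-init[0]]
--     for i in range(len(diff_seq)):
--         first_inv.append(first_inv[i] + diff_seq[i])
--
--     second_inv = [init[0]]
--     for i in range(len(first_inv)):
--         second_inv.append(second_inv[i] + first_inv[i])
--
--     return second_inv[2:]
-- ===== SOURCE B (Python) =====
-- def invert_differening(diff_seq, init):
--     # one streaming pass: running first/second accumulators, no intermediate lists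
--     first = init[1] - init[0]
--     second = init[1]
--     out = []
--     for d in diff_seq:
--         first += d
--         second += first
--         out.append(second)
--     return out
-- ===== Notes on version B (the rewrite author's own statement) =====
-- stated objective: simpler
-- what changed: Replaced the two sequential list-building prefix-sum passes plus a [2:] slice by a single streaming loop over diff_seq that keeps two running scalar accumulators and never materialises the intermediate lists.
import Mathlib
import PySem

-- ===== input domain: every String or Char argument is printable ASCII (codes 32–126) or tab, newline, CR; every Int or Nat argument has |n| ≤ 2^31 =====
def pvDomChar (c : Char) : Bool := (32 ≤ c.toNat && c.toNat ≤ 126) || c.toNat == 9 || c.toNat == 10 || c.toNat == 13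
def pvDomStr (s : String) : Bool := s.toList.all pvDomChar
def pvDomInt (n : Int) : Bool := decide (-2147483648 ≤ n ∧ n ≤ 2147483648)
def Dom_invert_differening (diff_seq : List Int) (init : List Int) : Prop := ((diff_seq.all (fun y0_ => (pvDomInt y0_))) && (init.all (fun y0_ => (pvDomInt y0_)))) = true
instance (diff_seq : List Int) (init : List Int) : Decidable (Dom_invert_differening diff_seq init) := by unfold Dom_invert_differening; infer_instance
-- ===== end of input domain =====

-- B replaces A's two list-building prefix-sum passes + [2:] slice by one streaming loop
-- with two scalar accumulators (objective: simpler). Return-value equivalence only.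

-- ===== PORT A =====
def invert_differening (diff_seq : List Int) (init : List Int) : List Int :=
  let first_inv := (PySem.List.pyRange 0 diff_seq.length 1).foldl
    (fun acc i => acc ++ [PySem.List.pyGetD acc i 0 + PySem.List.pyGetD diff_seq i 0])
    [PySem.List.pyGetD init 1 0 - PySem.List.pyGetD init 0 0]
  let second_inv := (PySem.List.pyRange 0 first_inv.length 1).foldl
    (fun acc i => acc ++ [PySem.List.pyGetD acc i 0 + PySem.List.pyGetD first_inv i 0])
    [PySem.List.pyGetD init 0 0]
  PySem.List.slice second_inv (some 2) none

-- ===== PORT B =====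
def invert_differening_alt (diff_seq : List Int) (init : List Int) : List Int :=
  let first := PySem.List.pyGetD init 1 0 - PySem.List.pyGetD init 0 0
  let second := PySem.List.pyGetD init 1 0
  (diff_seq.foldl
    (fun (st : Int × Int × List Int) d =>
      let f := st.1 + d
      let s := st.2.1 + f
      (f, s, st.2.2 ++ [s]))
    (first, second, ([] : List Int))).2.2

-- ===== PRECONDITION & SPEC =====
-- Python A raises IndexError on init[1] (or init[0]) when init has fewer than 2 elements.
def Pre_invert_differening (diff_seq : List Int) (init : List Int) : Prop := 2 ≤ init.length
instance (diff_seq : List Int) (init : List Int) : Decidable (Pre_invert_differening diff_seq init) := by unfold Pre_invert_differening; infer_instance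
def pvWitness_invert_differening : List Int × List Int := ([1, -2, 3], [5, 7])

def Spec_invert_differening (diff_seq : List Int) (init : List Int) (out : List Int) : Prop := out = invert_differening_alt diff_seq init
instance (diff_seq : List Int) (init : List Int) (out : List Int) : Decidable (Spec_invert_differening diff_seq init out) := by unfold Spec_invert_differening; infer_instance

-- ===== CLAIM (what is proved, stated in full; the proofs are below) =====
def Claim_equal_invert_differening : Prop := ∀ (diff_seq : List Int) (init : List Int), Dom_invert_differening diff_seq init → Pre_invert_differening diff_seq init → Spec_invert_differening diff_seq init (invert_differening diff_seq init)

-- ===== LEMMAS AND PROOFS =====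

-- closed form of A's prefix-sum passes
def scanSum (c : Int) (src : List Int) (n : Nat) : List Int :=
  (List.range (n + 1)).map (fun k => c + (src.take k).sum)

-- B's streaming output, as a structural recursion
def bList (f s : Int) : List Int → List Int
  | [] => []
  | d :: ds => (s + (f + d)) :: bList (f + d) (s + (f + d)) ds

lemma length_scanSum (c : Int) (src : List Int) (n : Nat) :
    (scanSum c src n).length = n + 1 := by
  simp [scanSum]

lemma length_bList (f s : Int) (ds : List Int) : (bList f s ds).length = ds.length := by
  induction ds generalizing f s with
  | nil => rfl
  | cons d ds ih => simp [bList, ih]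

lemma foldA (src : List Int) (c : Int) (n : Nat) (h : n ≤ src.length) :
    (PySem.List.pyRange 0 n 1).foldl
      (fun acc i => acc ++ [PySem.List.pyGetD acc i 0 + PySem.List.pyGetD src i 0]) [c]
    = scanSum c src n := by
  induction n with
  | zero =>
    simp [PySem.List.pyRange_one_eq_nil, scanSum]
  | succ n ih =>
    have hn : n ≤ src.length := Nat.le_of_succ_le h
    have hrange : PySem.List.pyRange 0 ((n : Int) + 1) 1
        = PySem.List.pyRange 0 (n : Int) 1 ++ [(n : Int)] :=
      PySem.List.pyRange_one_succ_right (by positivity)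
    have hcast : ((n + 1 : Nat) : Int) = (n : Int) + 1 := by push_cast; ring
    rw [hcast, hrange, List.foldl_append, ih hn]
    simp only [List.foldl_cons, List.foldl_nil]
    have h1 : PySem.List.pyGetD (scanSum c src n) (n : Int) 0
        = c + (src.take n).sum := by
      rw [PySem.List.pyGetD_natCast]
      simp [scanSum, List.getD_eq_getElem?_getD]
    have h2 : PySem.List.pyGetD src (n : Int) 0 = src[n]'(by omega) := by
      rw [PySem.List.pyGetD_natCast]
      simp [List.getD_eq_getElem?_getD, List.getElem?_eq_getElem (show n < src.length by omega)]
    rw [h1, h2]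
    have hsum : (src.take (n + 1)).sum = (src.take n).sum + src[n]'(by omega) := by
      rw [List.sum_take_succ]
    simp only [scanSum, List.range_succ, List.map_append, List.map_cons, List.map_nil]
    rw [hsum]
    ring_nf

lemma foldB (ds : List Int) (f s : Int) (out : List Int) :
    (ds.foldl
      (fun (st : Int × Int × List Int) d =>
        let f := st.1 + d
        let s := st.2.1 + f
        (f, s, st.2.2 ++ [s]))
      (f, s, out)).2.2 = out ++ bList f s ds := by
  induction ds generalizing f s out with
  | nil => simp [bList]
  | cons d ds ih => simp [bList, ih, List.append_assoc]

lemma sum_map_range (g : Nat → Int) (n : Nat) :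
    ((List.range n).map g).sum = ∑ i ∈ Finset.range n, g i := by
  induction n with
  | zero => simp
  | succ n ih => simp [List.range_succ, ih, Finset.sum_range_succ]

lemma bList_getElem (ds : List Int) (f s : Int) (k : Nat) (hk : k < ds.length) :
    (bList f s ds)[k]'(by rw [length_bList]; exact hk)
    = s + ∑ i ∈ Finset.range (k + 1), (f + (ds.take (i + 1)).sum) := by
  induction ds generalizing f s k with
  | nil => simp at hk
  | cons d ds ih =>
    cases k with
    | zero => simp [bList]
    | succ k =>
      have hk' : k < ds.length := by simpa using hk
      have := ih (f + d) (s + (f + d)) k hk'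
      simp only [bList, List.getElem_cons_succ]
      rw [this]
      conv_rhs => rw [Finset.sum_range_succ']
      have hsum : ∑ i ∈ Finset.range (k + 1), (f + ((d :: ds).take (i + 1 + 1)).sum)
          = ∑ i ∈ Finset.range (k + 1), ((f + d) + (ds.take (i + 1)).sum) :=
        Finset.sum_congr rfl (fun i _ => by simp [List.take_succ_cons]; ring)
      rw [hsum]
      simp only [List.take_succ_cons, List.take_zero, List.sum_cons, List.sum_nil]
      ring

lemma main_eq (diff : List Int) (f0 s0 : Int) :
    List.drop 2 (scanSum s0 (scanSum f0 diff diff.length) (diff.length + 1))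
    = bList f0 (s0 + f0) diff := by
  set n := diff.length with hn
  apply List.ext_getElem
  · simp [scanSum, length_bList]
    omega
  · intro k hk1 hk2
    have hklen : k < n := by
      have := hk2; rw [length_bList] at this; exact this
    rw [List.getElem_drop]
    have hb := bList_getElem diff f0 (s0 + f0) k hklen
    rw [hb]
    -- left side: element 2+k of the outer scanSum
    have hlt : 2 + k < n + 1 + 1 := by omega
    simp only [scanSum, List.getElem_map, List.getElem_range]
    -- (take (2+k) of map over range (n+1)) = map over range (2+k)
    have htake : (List.range (n + 1)).take (2 + k) = List.range (2 + k) := by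
      rw [List.take_range]
      congr 1
      omega
    rw [← List.map_take, htake, sum_map_range]
    have h2k : 2 + k = (k + 1) + 1 := by omega
    rw [h2k, Finset.sum_range_succ']
    simp only [List.take_zero, List.sum_nil, add_zero]
    ring_nf

theorem invert_differening_spec_aux (diff : List Int) (a b : Int) (rest : List Int) :
    invert_differening diff (a :: b :: rest) = invert_differening_alt diff (a :: b :: rest) := by
  have hga : PySem.List.pyGetD (a :: b :: rest) 0 0 = a := by
    simp [PySem.List.pyGetD_zero_cons]
  have hgb : PySem.List.pyGetD (a :: b :: rest) 1 0 = b := by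
    rw [show (1 : Int) = ((1 : Nat) : Int) by norm_num, PySem.List.pyGetD_natCast]
    rfl
  unfold invert_differening invert_differening_alt
  simp only [hga, hgb]
  rw [foldA diff (b - a) diff.length le_rfl]
  rw [foldA (scanSum (b - a) diff diff.length) a (scanSum (b - a) diff diff.length).length le_rfl]
  rw [length_scanSum]
  rw [show PySem.List.slice (scanSum a (scanSum (b - a) diff diff.length) (diff.length + 1)) (some 2) none
      = List.drop 2 (scanSum a (scanSum (b - a) diff diff.length) (diff.length + 1)) by
    rw [show (2 : Int) = ((2 : Nat) : Int) by norm_num, PySem.List.slice_from_natCast]]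
  rw [main_eq diff (b - a) a, foldB]
  simp [show a + (b - a) = b by ring]

-- ===== VERDICT (by name: the statement is the Claim_ definition above) =====
theorem invert_differening_spec : Claim_equal_invert_differening := by
  intro diff init _ hpre
  unfold Pre_invert_differening at hpre
  match init, hpre with
  | a :: b :: rest, _ =>
    exact invert_differening_spec_aux diff a b rest
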